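-- pv_equiv track=rewrite | github.com/benquick123/code-profiling | code/batch-2/dn6 - spet tviti/Z-17011-1450.py | hashtagi
-- ===== SOURCE A (Python) =====
-- import collections
--
-- def avtor(tvit):
--     tvit = tvit.split()
--     avtor = tvit[0].replace(":", " ").strip()
--     return avtor
--
-- def izloci_besedo(beseda):
--     cista_beseda = beseda
--     for i in beseda:
--         if not i.isalnum():
--             cista_beseda = cista_beseda.strip(i)
--     return cista_beseda
--
-- def se_zacne_z(tvit, c):
--     prave_besede = []
--     for beseda in tvit.split():
--         if beseda.startswith(c):
--             prave_besede.append(izloci_besedo(beseda))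
--     return prave_besede
--
-- def hashtagi(tviti):
--     hashi = collections.defaultdict(list)
--     for tvit in tviti:
--         avtor1 = avtor(tvit)
--         beseda = se_zacne_z(tvit, "#")
--         for tag in beseda:
--             if avtor1 not in tag:
--                 hashi[tag].append(avtor1)
--     for tvit, seznam in hashi.items():
--         seznam = sorted(seznam)
--         hashi[tvit] = seznam
--     return hashi
-- ===== SOURCE B (Python) =====
-- import collections
--
-- def avtor(tvit):
--     tvit = tvit.split()
--     avtor = tvit[0].replace(":", " ").strip()
--     return avtor
--
-- def izloci_besedo(beseda):
--     cista_beseda = beseda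
--     for i in beseda:
--         if not i.isalnum():
--             cista_beseda = cista_beseda.strip(i)
--     return cista_beseda
--
-- def se_zacne_z(tvit, c):
--     prave_besede = []
--     for beseda in tvit.split():
--         if beseda.startswith(c):
--             prave_besede.append(izloci_besedo(beseda))
--     return prave_besede
--
-- def hashtagi(tviti):
--     pairs = []
--     for tvit in tviti:
--         a = avtor(tvit)
--         pairs += [(tag, a) for tag in se_zacne_z(tvit, "#") if a not in tag]
--     hashi = collections.defaultdict(list)
--     for tag in dict.fromkeys(t for t, _ in pairs):
--         hashi[tag] = sorted(a for t, a in pairs if t == tag)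
--     return hashi
-- ===== Notes on version B (the rewrite author's own statement) =====
-- stated objective: alternative
-- what changed: B collects one flat (tag, author) pair list, then builds the dict in one grouping pass over the first-occurrence-deduplicated tags (sorting each group's filtered authors), instead of A's incremental per-tag dict appends followed by a second dict-rewriting pass that re-sorts every value.
import Mathlib
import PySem

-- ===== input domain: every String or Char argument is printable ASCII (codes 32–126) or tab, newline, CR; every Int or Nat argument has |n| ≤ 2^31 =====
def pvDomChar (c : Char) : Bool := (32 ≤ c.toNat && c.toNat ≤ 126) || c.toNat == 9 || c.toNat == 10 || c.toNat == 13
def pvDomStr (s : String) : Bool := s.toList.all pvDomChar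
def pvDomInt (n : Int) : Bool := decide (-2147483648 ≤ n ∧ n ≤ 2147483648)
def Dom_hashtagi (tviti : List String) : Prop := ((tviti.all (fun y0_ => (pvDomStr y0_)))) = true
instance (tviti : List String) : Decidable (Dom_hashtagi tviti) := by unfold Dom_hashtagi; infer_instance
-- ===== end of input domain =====

-- B groups a flat (tag, author) pair list by first-occurrence key order instead of A's
-- incremental dict-append plus per-key re-sorting pass; objective: alternative decomposition.

-- ===== PORT A =====
-- avtor(tvit); 'none' is exactly Python's IndexError on tvit.split()[0] (excluded by Pre_)
def pvAvtor? (tvit : String) : Option String :=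
  match PySem.List.pyGet? (PySem.Str.split₀ tvit) 0 with
  | none => none
  | some w => some (PySem.Str.strip (PySem.Str.replace w ":" " "))

-- izloci_besedo: iterates the ORIGINAL word's chars, stripping each non-alnum char from both ends
def pvIzlociBesedo (beseda : String) : String :=
  beseda.toList.foldl
    (fun cista i =>
      if !(PySem.Chars.isalnum i) then PySem.Str.stripChars cista (String.ofList [i]) else cista)
    beseda

def pvSeZacneZ (tvit : String) (c : String) : List String :=
  (PySem.Str.split₀ tvit).foldl
    (fun acc beseda =>
      if PySem.Str.startswith beseda c then acc ++ [pvIzlociBesedo beseda] else acc)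
    []

def hashtagi (tviti : List String) : List (String × List String) :=
  let hashi : PySem.Dict String (List String) :=
    tviti.foldl
      (fun d tvit =>
        match pvAvtor? tvit with
        | none => d
        | some avtor1 =>
          (pvSeZacneZ tvit "#").foldl
            (fun d tag =>
              if !(PySem.Str.isIn avtor1 tag) then d.modify tag [] (· ++ [avtor1]) else d)
            d)
      PySem.Dict.empty
  -- second loop: for tvit, seznam in hashi.items(): hashi[tvit] = sorted(seznam)
  (hashi.items.foldl
    (fun d p => d.insert p.1 (PySem.List.sorted p.2 (fun x => x) false))
    hashi).items

-- ===== PORT B =====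
def hashtagi_alt (tviti : List String) : List (String × List String) :=
  let pairs : List (String × String) :=
    tviti.foldl
      (fun acc tvit =>
        match pvAvtor? tvit with
        | none => acc
        | some a =>
          acc ++ ((pvSeZacneZ tvit "#").filter
                    (fun tag => !(PySem.Str.isIn a tag))).map (fun tag => (tag, a)))
      []
  ((PySem.List.dedup (pairs.map (·.1))).foldl
    (fun d tag =>
      d.insert tag
        (PySem.List.sorted ((pairs.filter (fun p => p.1 == tag)).map (·.2)) (fun x => x) false))
    (PySem.Dict.empty : PySem.Dict String (List String))).items

-- ===== PRECONDITION & SPEC =====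
-- Pre_ excludes inputs with a whitespace-only tweet: there A raises IndexError (tvit.split()[0]).
def Pre_hashtagi (tviti : List String) : Prop := ∀ tvit ∈ tviti, PySem.Str.split₀ tvit ≠ []
instance (tviti : List String) : Decidable (Pre_hashtagi tviti) := by unfold Pre_hashtagi; infer_instance

def pvWitness_hashtagi : List String :=
  ["ana: hej #lep #dan!", "bine: #lep pozdrav", "cilka: pozdravljen #dan #bine"]

def Spec_hashtagi (tviti : List String) (out : List (String × List String)) : Prop := out = hashtagi_alt tviti
instance (tviti : List String) (out : List (String × List String)) : Decidable (Spec_hashtagi tviti out) := by unfold Spec_hashtagi; infer_instance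

-- ===== CLAIM (what is proved, stated in full; the proofs are below) =====
def Claim_equal_hashtagi : Prop := ∀ (tviti : List String), Dom_hashtagi tviti → Pre_hashtagi tviti → Spec_hashtagi tviti (hashtagi tviti)

-- ===== LEMMAS AND PROOFS =====

-- the flat pair list B builds
def pvPairs (tviti : List String) : List (String × String) :=
  tviti.foldl
    (fun acc tvit =>
      match pvAvtor? tvit with
      | none => acc
      | some a =>
        acc ++ ((pvSeZacneZ tvit "#").filter
                  (fun tag => !(PySem.Str.isIn a tag))).map (fun tag => (tag, a)))
    []

-- A's per-tweet tag loop = fold of modify-append over the tweet's pair list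
lemma pv_inner_eq (tags : List String) (a : String) (d : PySem.Dict String (List String)) :
    tags.foldl
      (fun d tag => if !(PySem.Str.isIn a tag) then d.modify tag [] (· ++ [a]) else d) d
    = ((tags.filter (fun tag => !(PySem.Str.isIn a tag))).map (fun tag => (tag, a))).foldl
        (fun d p => d.modify p.1 [] (· ++ [p.2])) d := by
  induction tags generalizing d with
  | nil => rfl
  | cons t ts ih =>
    cases hc : PySem.Chars.isIn a.toList t.toList <;>
      [skip; skip] <;>
      · simp only [List.foldl_cons, List.filter_cons] at ih ⊢
        simp only [PySem.Str.isIn_eq, Bool.not_eq_true'] at ih ⊢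
        simp [hc, ih]

-- the per-tweet contribution to the flat pair list
def pvTweetPairs (tvit : String) : List (String × String) :=
  match pvAvtor? tvit with
  | none => []
  | some a =>
    ((pvSeZacneZ tvit "#").filter (fun tag => !(PySem.Str.isIn a tag))).map (fun tag => (tag, a))

lemma pvPairs_acc (tviti : List String) (acc : List (String × String)) :
    tviti.foldl
      (fun acc tvit =>
        match pvAvtor? tvit with
        | none => acc
        | some a =>
          acc ++ ((pvSeZacneZ tvit "#").filter
                    (fun tag => !(PySem.Str.isIn a tag))).map (fun tag => (tag, a)))
      acc
    = acc ++ tviti.flatMap pvTweetPairs := by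
  induction tviti generalizing acc with
  | nil => simp
  | cons t ts ih =>
    cases h : pvAvtor? t <;>
      simp only [List.foldl_cons, List.flatMap_cons, h, pvTweetPairs, List.nil_append,
        List.append_assoc, ih]

lemma pvPairs_eq (tviti : List String) : pvPairs tviti = tviti.flatMap pvTweetPairs := by
  simpa using pvPairs_acc tviti []

-- A's whole first loop = fold of modify-append over the flat pair list
lemma pv_flatten (tviti : List String) (d : PySem.Dict String (List String)) :
    tviti.foldl
      (fun d tvit =>
        match pvAvtor? tvit with
        | none => d
        | some avtor1 =>
          (pvSeZacneZ tvit "#").foldl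
            (fun d tag =>
              if !(PySem.Str.isIn avtor1 tag) then d.modify tag [] (· ++ [avtor1]) else d)
            d)
      d
    = (pvPairs tviti).foldl (fun d p => d.modify p.1 [] (· ++ [p.2])) d := by
  rw [pvPairs_eq]
  induction tviti generalizing d with
  | nil => rfl
  | cons t ts ih =>
    cases h : pvAvtor? t with
    | none => simp only [List.foldl_cons, List.flatMap_cons, h, pvTweetPairs, List.nil_append, ih]
    | some a =>
      simp only [List.foldl_cons, List.flatMap_cons, List.foldl_append, h, pvTweetPairs]
      rw [pv_inner_eq, ih]

-- folding insert over a dict's own items (nodup keys) maps the values in place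
lemma pv_items_foldl_insert (g : List String → List String) :
    ∀ (l pre : List (String × List String)) (d : PySem.Dict String (List String)),
      d.items = pre ++ l → d.keys.Nodup →
      (l.foldl (fun d p => d.insert p.1 (g p.2)) d).items
        = pre ++ l.map (fun p => (p.1, g p.2)) := by
  intro l
  induction l with
  | nil => intro pre d hit _; simpa using hit
  | cons p l ih =>
    intro pre d hit hnd
    have hkeys : d.keys = (pre ++ p :: l).map (·.1) := by
      simp only [PySem.Dict.keys, hit]
    have hcont : d.contains p.1 = true := by
      rw [PySem.Dict.contains_iff_mem_keys, hkeys]; simp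
    have hne_pre : ∀ q ∈ pre, q.1 ≠ p.1 := by
      intro q hq
      have := hnd
      rw [hkeys] at this
      simp only [List.map_append, List.map_cons, List.nodup_append] at this
      have h2 := this.2.2 q.1 (List.mem_map_of_mem hq)
      simp at h2
      exact h2.1
    have hne_l : ∀ q ∈ l, q.1 ≠ p.1 := by
      intro q hq
      have := hnd
      rw [hkeys] at this
      simp only [List.map_append, List.map_cons, List.nodup_append] at this
      have h2 := this.2.1
      simp only [List.nodup_cons] at h2
      intro he
      exact h2.1 (he ▸ List.mem_map_of_mem hq)
    have hitems : (d.insert p.1 (g p.2)).items = pre ++ (p.1, g p.2) :: l := by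
      rw [PySem.Dict.items_insert_of_contains _ _ hcont, hit, List.map_append, List.map_cons]
      congr 1
      · calc pre.map (fun q => if q.1 == p.1 then (p.1, g p.2) else q)
            = pre.map id := List.map_congr_left (fun q hq => by simp [hne_pre q hq])
          _ = pre := List.map_id pre
      · simp only [beq_self_eq_true, if_true]
        congr 1
        calc l.map (fun q => if q.1 == p.1 then (p.1, g p.2) else q)
            = l.map id := List.map_congr_left (fun q hq => by simp [hne_l q hq])
          _ = l := List.map_id l
    have hnd' : (d.insert p.1 (g p.2)).keys.Nodup := by
      have h0 : ((pre ++ p :: l).map (·.1)).Nodup := hkeys ▸ hnd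
      simp only [PySem.Dict.keys, hitems, List.map_append, List.map_cons]
      simpa [List.map_append, List.map_cons] using h0
    rw [List.foldl_cons]
    have hrec := ih (pre ++ [(p.1, g p.2)]) (d.insert p.1 (g p.2)) (by rw [hitems]; simp) hnd'
    rw [hrec]
    simp

-- inserting fresh, distinct keys appends in order (identity-key form used by B)
lemma pv_fresh (v : String → List String) :
    ∀ (ks : List String) (d : PySem.Dict String (List String)),
      (∀ a ∈ ks, d.contains a = false) → ks.Nodup →
      (ks.foldl (fun d tag => d.insert tag (v tag)) d).items
        = d.items ++ ks.map (fun k => (k, v k)) := by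
  intro ks
  induction ks with
  | nil => intro d _ _; simp
  | cons k ks ih =>
    intro d hfresh hnd
    rw [List.foldl_cons]
    have hk : d.contains k = false := hfresh k (by simp)
    have hrest : ∀ a ∈ ks, (d.insert k (v k)).contains a = false := by
      intro a ha
      rw [PySem.Dict.contains_insert]
      have hak : a ≠ k := by
        rintro rfl; exact (List.nodup_cons.mp hnd).1 ha
      simp [hak, hfresh a (List.mem_cons_of_mem _ ha)]
    rw [ih _ hrest (List.nodup_cons.mp hnd).2,
        PySem.Dict.items_insert_of_not_contains _ _ hk]
    simp

theorem hashtagi_spec : Claim_equal_hashtagi := by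
  intro tviti _ _
  unfold Spec_hashtagi hashtagi hashtagi_alt
  simp only []
  rw [pv_flatten]
  rw [show (tviti.foldl
      (fun acc tvit =>
        match pvAvtor? tvit with
        | none => acc
        | some a =>
          acc ++ ((pvSeZacneZ tvit "#").filter
                    (fun tag => !(PySem.Str.isIn a tag))).map (fun tag => (tag, a)))
      []) = pvPairs tviti from rfl]
  set pairs := pvPairs tviti with hpairs
  set D : PySem.Dict String (List String) :=
    pairs.foldl (fun d p => d.modify p.1 [] (· ++ [p.2])) PySem.Dict.empty with hD
  have hknd : D.keys.Nodup := by
    rw [hD]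
    exact PySem.Dict.nodup_keys_foldl_modify_key pairs (·.1) [] (fun d p => (· ++ [p.2])) _
      (by simp [pysem])
  have hkeys : D.keys = PySem.List.dedup (pairs.map (·.1)) := by
    rw [hD, PySem.Dict.keys_foldl_modify_key]
    simp [pysem, PySem.Set.update_nil_left]
  have hget : ∀ k : String, D.getD k [] = (pairs.filter (fun p => p.1 == k)).map (·.2) := by
    intro k
    rw [hD, PySem.Dict.getD_foldl_modify_append]
    simp [pysem]
  rw [pv_items_foldl_insert (fun v => PySem.List.sorted v (fun x => x) false) D.items [] D
        (by simp) hknd]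
  rw [PySem.Dict.items_eq_map_keys D hknd []]
  rw [pv_fresh
        (fun tag => PySem.List.sorted ((pairs.filter (fun p => p.1 == tag)).map (·.2))
                (fun x => x) false)
        (PySem.List.dedup (pairs.map (·.1))) PySem.Dict.empty
        (by simp [pysem]) (PySem.List.nodup_dedup (pairs.map (·.1)))]
  rw [← hkeys]
  simp only [List.map_map, List.nil_append, PySem.Dict.empty]
  refine List.map_congr_left ?_
  intro k _
  simp [hget k]
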